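-- pv_equiv track=rewrite | github.com/akhamis-caliber/caliber-test | caliber/backend/scoring_service/scoring.py | _assign_quality_status
-- ===== SOURCE A (Python) =====
-- from typing import Dict, Any, Tuple, List
--
-- def _assign_quality_status(percentile_ranks: List[int]) -> List[str]:
--     """Assign quality status based on percentile ranks"""
--     statuses = []
--
--     for percentile in percentile_ranks:
--         if percentile >= 75:
--             statuses.append("good")
--         elif percentile >= 25:
--             statuses.append("moderate")
--         else:
--             statuses.append("poor")
--
--     return statuses
-- ===== SOURCE B (Python) =====
-- from typing import List
--
-- def _assign_quality_status(percentile_ranks: List[int]) -> List[str]: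
--     """Assign quality status based on percentile ranks"""
--     # layered refinement: default everything to "good", then downgrade in stages
--     statuses = ["good"] * len(percentile_ranks)
--     statuses = ["moderate" if p < 75 else s for p, s in zip(percentile_ranks, statuses)]
--     statuses = ["poor" if p < 25 else s for p, s in zip(percentile_ranks, statuses)]
--     return statuses
-- ===== Notes on version B (the rewrite author's own statement) =====
-- stated objective: alternative
-- what changed: Replaces A's single-pass if/elif accumulator with layered refinement: a default all-'good' list followed by two staged downgrade passes (p<75 to 'moderate', then p<25 to 'poor').
import Mathlib
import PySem

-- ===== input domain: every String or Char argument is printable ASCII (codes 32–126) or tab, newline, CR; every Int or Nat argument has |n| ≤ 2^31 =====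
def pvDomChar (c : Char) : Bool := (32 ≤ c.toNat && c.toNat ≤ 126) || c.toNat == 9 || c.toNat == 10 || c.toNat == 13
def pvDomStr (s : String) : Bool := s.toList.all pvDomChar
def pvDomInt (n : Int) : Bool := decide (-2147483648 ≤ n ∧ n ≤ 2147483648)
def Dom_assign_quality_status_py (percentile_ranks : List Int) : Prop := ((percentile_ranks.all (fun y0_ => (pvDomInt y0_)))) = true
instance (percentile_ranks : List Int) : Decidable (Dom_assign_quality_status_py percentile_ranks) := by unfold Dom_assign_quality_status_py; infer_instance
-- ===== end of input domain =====

-- B replaces A's one-pass branch cascade by layered refinement: an all-"good" default list, then two staged downgrade passes (alternative; same cost).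

-- ===== PORT A =====
-- literal port: loop appending to `statuses`
def assign_quality_status_py (percentile_ranks : List Int) : List String :=
  percentile_ranks.foldl (fun statuses percentile =>
    if percentile ≥ 75 then statuses ++ ["good"]
    else if percentile ≥ 25 then statuses ++ ["moderate"]
    else statuses ++ ["poor"]) []

-- ===== PORT B =====
-- ["good"] * len(...), then two zip-comprehension downgrade passes
def assign_quality_status_py_alt (percentile_ranks : List Int) : List String :=
  let statuses0 := List.replicate percentile_ranks.length "good"
  let statuses1 := List.zipWith (fun p s => if p < 75 then "moderate" else s) percentile_ranks statuses0
  List.zipWith (fun p s => if p < 25 then "poor" else s) percentile_ranks statuses1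

-- ===== PRECONDITION & SPEC =====
def Spec_assign_quality_status_py (percentile_ranks : List Int) (out : List String) : Prop := out = assign_quality_status_py_alt percentile_ranks
instance (percentile_ranks : List Int) (out : List String) : Decidable (Spec_assign_quality_status_py percentile_ranks out) := by unfold Spec_assign_quality_status_py; infer_instance

-- ===== CLAIM (what is proved, stated in full; the proofs are below) =====
def Claim_equal_assign_quality_status_py : Prop := ∀ (percentile_ranks : List Int), Dom_assign_quality_status_py percentile_ranks → Spec_assign_quality_status_py percentile_ranks (assign_quality_status_py percentile_ranks)

-- ===== LEMMAS AND PROOFS =====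

-- B's staged passes compute the per-element classification
theorem pv_alt_eq_map (xs : List Int) :
    assign_quality_status_py_alt xs
      = xs.map (fun p => if p ≥ 75 then "good" else if p ≥ 25 then "moderate" else "poor") := by
  unfold assign_quality_status_py_alt
  induction xs with
  | nil => rfl
  | cons x t ih =>
    simp only [List.length_cons, List.replicate_succ, List.zipWith_cons_cons, List.map_cons] at *
    rw [ih]
    congr 1
    by_cases h75 : (75:Int) ≤ x
    · simp [h75, show ¬ x < 75 by omega, show ¬ x < 25 by omega]
    · by_cases h25 : (25:Int) ≤ x
      · simp [show x < 75 by omega, show ¬ x < 25 by omega, h75, h25]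
      · simp [show x < 25 by omega, h75, h25]

-- A's accumulator loop computes the same map
theorem pv_foldl_acc (xs : List Int) (acc : List String) :
    xs.foldl (fun statuses percentile =>
      if percentile ≥ 75 then statuses ++ ["good"]
      else if percentile ≥ 25 then statuses ++ ["moderate"]
      else statuses ++ ["poor"]) acc
      = acc ++ xs.map (fun p => if p ≥ 75 then "good" else if p ≥ 25 then "moderate" else "poor") := by
  induction xs generalizing acc with
  | nil => simp
  | cons x t ih =>
    simp only [List.foldl, List.map_cons]
    rw [ih]
    split_ifs <;> simp

-- ===== VERDICT (by name: the statement is the Claim_ definition above) =====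
theorem assign_quality_status_py_spec : Claim_equal_assign_quality_status_py := by
  intro xs _
  unfold Spec_assign_quality_status_py assign_quality_status_py
  rw [pv_alt_eq_map, pv_foldl_acc]
  simp
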